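-- pv_equiv track=rewrite | github.com/ywatanabe1989/scitex-scholar | src/scitex_scholar/metadata_engines/ScholarEngine.py | _identifiers_match
-- ===== SOURCE A (Python) =====
-- from typing import Dict, List
--
-- def _identifiers_match(ids1: Dict, ids2: Dict) -> bool:
--     """Check if any identifiers match between two papers."""
--     if not ids1 or not ids2:
--         return False
--
--     # Check each identifier type
--     for id_type in ["doi", "pmid", "arxiv_id", "corpus_id", "scholar_id"]:
--         val1 = ids1.get(id_type)
--         val2 = ids2.get(id_type)
--         if val1 and val2 and val1 == val2:
--             return True
--
--     return False
-- ===== SOURCE B (Python) =====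
-- ID_TYPES = ["doi", "pmid", "arxiv_id", "corpus_id", "scholar_id"]
--
-- def _identifiers_match(ids1, ids2) -> bool:
--     """Check if any identifiers match between two papers."""
--     s1 = {(t, ids1.get(t)) for t in ID_TYPES if ids1.get(t)}
--     s2 = {(t, ids2.get(t)) for t in ID_TYPES if ids2.get(t)}
--     return bool(s1 & s2)
-- ===== Notes on version B (the rewrite author's own statement) =====
-- stated objective: idiomatic
-- what changed: Replaces A's guarded per-type pairwise comparison loop by building two sets of truthy (type, value) pairs and returning whether their intersection is nonempty; the empty-dict guard disappears because empty dicts yield empty sets.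
import Mathlib
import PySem

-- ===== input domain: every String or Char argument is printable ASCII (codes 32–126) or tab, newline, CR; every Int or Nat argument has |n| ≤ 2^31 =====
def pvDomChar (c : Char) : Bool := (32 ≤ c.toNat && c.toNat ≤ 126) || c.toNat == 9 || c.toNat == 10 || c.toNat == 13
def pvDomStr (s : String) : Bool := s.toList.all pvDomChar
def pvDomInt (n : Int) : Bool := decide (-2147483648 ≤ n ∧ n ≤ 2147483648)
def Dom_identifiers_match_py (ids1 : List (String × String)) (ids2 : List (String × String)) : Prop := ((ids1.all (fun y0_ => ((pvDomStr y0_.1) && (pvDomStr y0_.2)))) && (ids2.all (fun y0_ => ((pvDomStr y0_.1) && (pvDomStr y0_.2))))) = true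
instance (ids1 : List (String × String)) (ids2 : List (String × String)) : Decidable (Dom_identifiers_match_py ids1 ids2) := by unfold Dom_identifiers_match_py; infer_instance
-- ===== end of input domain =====

-- B replaces A's guarded pairwise loop over identifier types by building two sets of
-- truthy (type, value) pairs and testing their intersection (objective: idiomatic; not faster).

-- the five identifier types, a shared constant of both programs
def imTypes : List String := ["doi", "pmid", "arxiv_id", "corpus_id", "scholar_id"]

-- ===== PORT A =====
def identifiers_match_py (ids1 : List (String × String)) (ids2 : List (String × String)) : Bool :=
  -- `if not ids1 or not ids2: return False`
  if ids1.isEmpty || ids2.isEmpty then false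
  else
    -- the for-loop with early `return True`; `val1 and val2 and val1 == val2`
    -- (a missing key gives None, an empty string is falsy)
    imTypes.any (fun t =>
      match (PySem.Dict.mk ids1).get? t, (PySem.Dict.mk ids2).get? t with
      | some v1, some v2 => (!(v1 == "")) && (!(v2 == "")) && (v1 == v2)
      | _, _ => false)

-- ===== PORT B =====
-- `(t, ids.get(t)) for t in ID_TYPES if ids.get(t)` : the pair kept for type t, if any
def keepPair (ids : List (String × String)) (t : String) : Option (String × String) :=
  match (PySem.Dict.mk ids).get? t with
  | some v => if v == "" then none else some (t, v)
  | none => none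

def identifiers_match_py_alt (ids1 : List (String × String)) (ids2 : List (String × String)) : Bool :=
  let s1 : PySem.Set (String × String) := PySem.Set.ofList (imTypes.filterMap (keepPair ids1))
  let s2 : PySem.Set (String × String) := PySem.Set.ofList (imTypes.filterMap (keepPair ids2))
  !(PySem.Set.inter s1 s2).isEmpty   -- bool(s1 & s2)

-- ===== PRECONDITION & SPEC =====
def Spec_identifiers_match_py (ids1 : List (String × String)) (ids2 : List (String × String)) (out : Bool) : Prop := out = identifiers_match_py_alt ids1 ids2
instance (ids1 : List (String × String)) (ids2 : List (String × String)) (out : Bool) : Decidable (Spec_identifiers_match_py ids1 ids2 out) := by unfold Spec_identifiers_match_py; infer_instance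

-- ===== CLAIM (what is proved, stated in full; the proofs are below) =====
def Claim_equal_identifiers_match_py : Prop := ∀ (ids1 : List (String × String)) (ids2 : List (String × String)), Dom_identifiers_match_py ids1 ids2 → Spec_identifiers_match_py ids1 ids2 (identifiers_match_py ids1 ids2)

-- ===== LEMMAS AND PROOFS =====

lemma keepPair_eq_some (ids : List (String × String)) (t : String) (p : String × String) :
    keepPair ids t = some p ↔ p.1 = t ∧ (PySem.Dict.mk ids).get? t = some p.2 ∧ p.2 ≠ "" := by
  obtain ⟨a, b⟩ := p
  unfold keepPair
  cases h : (PySem.Dict.mk ids).get? t with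
  | none => simp
  | some v => by_cases hv : v = "" <;> simp [hv] <;> aesop

-- both programs are characterised by the same existential
lemma alt_iff (ids1 ids2 : List (String × String)) :
    identifiers_match_py_alt ids1 ids2 = true ↔
    ∃ t v, t ∈ imTypes ∧ (PySem.Dict.mk ids1).get? t = some v ∧
      (PySem.Dict.mk ids2).get? t = some v ∧ v ≠ "" := by
  unfold identifiers_match_py_alt PySem.Set.inter PySem.Set.contains
  simp only [Bool.not_eq_true', List.isEmpty_eq_false_iff_exists_mem, List.mem_filter,
    PySem.Set.mem_ofList, List.mem_filterMap, keepPair_eq_some, List.contains_iff_mem]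
  constructor
  · rintro ⟨⟨a, b⟩, ⟨t1, ht1, rfl, hg1, hb⟩, t2, ht2, h2, hg2, _⟩
    subst h2
    exact ⟨a, b, ht1, hg1, hg2, hb⟩
  · rintro ⟨t, v, ht, hg1, hg2, hv⟩
    exact ⟨(t, v), ⟨t, ht, rfl, hg1, hv⟩, t, ht, rfl, hg2, hv⟩

lemma a_pred_iff (ids1 ids2 : List (String × String)) (t : String) :
    ((match (PySem.Dict.mk ids1).get? t, (PySem.Dict.mk ids2).get? t with
      | some v1, some v2 => (!(v1 == "")) && (!(v2 == "")) && (v1 == v2)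
      | _, _ => false) = true) ↔
    ∃ v, (PySem.Dict.mk ids1).get? t = some v ∧ (PySem.Dict.mk ids2).get? t = some v ∧ v ≠ "" := by
  cases h1 : (PySem.Dict.mk ids1).get? t <;> cases h2 : (PySem.Dict.mk ids2).get? t <;>
    simp <;> aesop

lemma a_body_iff (ids1 ids2 : List (String × String)) :
    (imTypes.any (fun t =>
      match (PySem.Dict.mk ids1).get? t, (PySem.Dict.mk ids2).get? t with
      | some v1, some v2 => (!(v1 == "")) && (!(v2 == "")) && (v1 == v2)
      | _, _ => false)) = true ↔
    ∃ t v, t ∈ imTypes ∧ (PySem.Dict.mk ids1).get? t = some v ∧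
      (PySem.Dict.mk ids2).get? t = some v ∧ v ≠ "" := by
  rw [List.any_eq_true]
  constructor
  · rintro ⟨t, ht, hp⟩
    obtain ⟨v, h⟩ := (a_pred_iff ids1 ids2 t).mp hp
    exact ⟨t, v, ht, h⟩
  · rintro ⟨t, v, ht, h⟩
    exact ⟨t, ht, (a_pred_iff ids1 ids2 t).mpr ⟨v, h⟩⟩

lemma get?_nil (t : String) : (PySem.Dict.mk ([] : List (String × String))).get? t = none := by
  simp [PySem.Dict.get?]

lemma alt_false_of_nil_left (ids2 : List (String × String)) :
    identifiers_match_py_alt [] ids2 = false := by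
  rw [Bool.eq_false_iff]
  intro h
  obtain ⟨t, v, _, hg, _⟩ := (alt_iff [] ids2).mp h
  rw [get?_nil] at hg
  simp at hg

lemma alt_false_of_nil_right (ids1 : List (String × String)) :
    identifiers_match_py_alt ids1 [] = false := by
  rw [Bool.eq_false_iff]
  intro h
  obtain ⟨t, v, _, _, hg, _⟩ := (alt_iff ids1 []).mp h
  rw [get?_nil] at hg
  simp at hg

-- ===== VERDICT (by name: the statement is the Claim_ definition above) =====
theorem identifiers_match_py_spec : Claim_equal_identifiers_match_py := by
  intro ids1 ids2 _
  unfold Spec_identifiers_match_py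
  by_cases h1 : ids1 = []
  · subst h1
    rw [alt_false_of_nil_left]
    rfl
  · by_cases h2 : ids2 = []
    · subst h2
      rw [alt_false_of_nil_right]
      unfold identifiers_match_py
      simp
    · have hA : identifiers_match_py ids1 ids2
          = (imTypes.any (fun t =>
              match (PySem.Dict.mk ids1).get? t, (PySem.Dict.mk ids2).get? t with
              | some v1, some v2 => (!(v1 == "")) && (!(v2 == "")) && (v1 == v2)
              | _, _ => false)) := by
        unfold identifiers_match_py
        simp [h1, h2]
      rw [hA, Bool.eq_iff_iff, a_body_iff, alt_iff]
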